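-- pv_equiv track=rewrite | github.com/Phuc-Ly-Hong/LastBotChess | resource/magic_bitboards.py | get_bishop_attacks
-- ===== SOURCE A (Python) =====
-- def get_bishop_attacks(square, blockers):
--     attacks = 0
--     rank, file = divmod(square, 8)
--     # ↗
--     r, f = rank + 1, file + 1
--     while r < 8 and f < 8:
--         sq = r * 8 + f
--         attacks |= 1 << sq
--         if (blockers >> sq) & 1:
--             break
--         r += 1
--         f += 1
--     # ↖
--     r, f = rank + 1, file - 1
--     while r < 8 and f >= 0:
--         sq = r * 8 + f
--         attacks |= 1 << sq
--         if (blockers >> sq) & 1: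
--             break
--         r += 1
--         f -= 1
--     # ↙
--     r, f = rank - 1, file - 1
--     while r >= 0 and f >= 0:
--         sq = r * 8 + f
--         attacks |= 1 << sq
--         if (blockers >> sq) & 1:
--             break
--         r -= 1
--         f -= 1
--     # ↘
--     r, f = rank - 1, file + 1
--     while r >= 0 and f < 8:
--         sq = r * 8 + f
--         attacks |= 1 << sq
--         if (blockers >> sq) & 1:
--             break
--         r -= 1
--         f += 1
--     return attacks
-- ===== SOURCE B (Python) =====
-- def get_bishop_attacks(square, blockers):
--     # For every target square, test alignment and line of sight, instead of tracing rays.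
--     rank, file = divmod(square, 8)
--     attacks = 0
--     for t in range(64):
--         tr, tf = divmod(t, 8)
--         n = abs(tr - rank)
--         if n == 0 or n != abs(tf - file):
--             continue
--         sr = 1 if tr > rank else -1
--         sf = 1 if tf > file else -1
--         if all(not blockers >> ((rank + i * sr) * 8 + file + i * sf) & 1
--                for i in range(1, n)):
--             attacks |= 1 << t
--     return attacks
-- ===== Notes on version B (the rewrite author's own statement) =====
-- stated objective: alternative
-- what changed: Instead of A's four blocker-terminated ray-tracing loops, B scans all 64 target squares once and sets a bit when the target is diagonally aligned with the bishop and every square strictly between is free (a line-of-sight predicate, no ray state, no early exit).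
-- outside the precondition, e.g. on get_bishop_attacks(72, 0): A returns 37183988054091628544, B returns 290499906672525312; on get_bishop_attacks(-9, 0): A raises ValueError, B raises ValueError
import Mathlib
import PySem

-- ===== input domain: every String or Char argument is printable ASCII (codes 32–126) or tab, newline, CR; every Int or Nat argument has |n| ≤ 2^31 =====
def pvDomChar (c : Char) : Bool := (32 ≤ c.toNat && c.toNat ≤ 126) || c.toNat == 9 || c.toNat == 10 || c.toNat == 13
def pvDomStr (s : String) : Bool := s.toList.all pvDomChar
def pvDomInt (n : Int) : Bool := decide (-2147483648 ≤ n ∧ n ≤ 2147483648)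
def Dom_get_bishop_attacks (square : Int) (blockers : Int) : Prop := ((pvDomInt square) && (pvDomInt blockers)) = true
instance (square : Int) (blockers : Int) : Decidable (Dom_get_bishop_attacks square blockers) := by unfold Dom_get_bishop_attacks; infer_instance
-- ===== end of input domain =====

-- B replaces A's four blocker-terminated ray-tracing loops by one scan over all 64 target
-- squares with a line-of-sight predicate (objective: alternative; same cost).

-- ===== PORT A =====
-- Each of A's four while-loops, step for step; fuel 8 never exhausts while the guard holds
-- (file = square % 8 ∈ [0,8), so each loop runs at most 7 iterations before its guard fails).
-- '1 << sq' / 'blockers >> sq' are ported via .toNat shifts, exact for sq ≥ 0 (Python raises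
-- on a negative shift count; such inputs are outside Pre_).
def pvRayNE (blockers : Int) : Nat → Int → Int → Int → Int
  | 0, _, _, acc => acc
  | fuel+1, r, f, acc =>
    if r < 8 ∧ f < 8 then
      let sq := r * 8 + f
      let acc' := PySem.Int.bor acc ((1 : Int) <<< sq.toNat)
      if PySem.Int.band (blockers >>> sq.toNat) 1 ≠ 0 then acc'
      else pvRayNE blockers fuel (r + 1) (f + 1) acc'
    else acc

def pvRayNW (blockers : Int) : Nat → Int → Int → Int → Int
  | 0, _, _, acc => acc
  | fuel+1, r, f, acc =>
    if r < 8 ∧ f ≥ 0 then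
      let sq := r * 8 + f
      let acc' := PySem.Int.bor acc ((1 : Int) <<< sq.toNat)
      if PySem.Int.band (blockers >>> sq.toNat) 1 ≠ 0 then acc'
      else pvRayNW blockers fuel (r + 1) (f - 1) acc'
    else acc

def pvRaySW (blockers : Int) : Nat → Int → Int → Int → Int
  | 0, _, _, acc => acc
  | fuel+1, r, f, acc =>
    if r ≥ 0 ∧ f ≥ 0 then
      let sq := r * 8 + f
      let acc' := PySem.Int.bor acc ((1 : Int) <<< sq.toNat)
      if PySem.Int.band (blockers >>> sq.toNat) 1 ≠ 0 then acc'
      else pvRaySW blockers fuel (r - 1) (f - 1) acc'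
    else acc

def pvRaySE (blockers : Int) : Nat → Int → Int → Int → Int
  | 0, _, _, acc => acc
  | fuel+1, r, f, acc =>
    if r ≥ 0 ∧ f < 8 then
      let sq := r * 8 + f
      let acc' := PySem.Int.bor acc ((1 : Int) <<< sq.toNat)
      if PySem.Int.band (blockers >>> sq.toNat) 1 ≠ 0 then acc'
      else pvRaySE blockers fuel (r - 1) (f + 1) acc'
    else acc

def get_bishop_attacks (square : Int) (blockers : Int) : Int :=
  let rank := PySem.Int.floordiv square 8
  let file := PySem.Int.mod square 8
  let a1 := pvRayNE blockers 8 (rank + 1) (file + 1) 0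
  let a2 := pvRayNW blockers 8 (rank + 1) (file - 1) a1
  let a3 := pvRaySW blockers 8 (rank - 1) (file - 1) a2
  pvRaySE blockers 8 (rank - 1) (file + 1) a3

-- ===== PORT B =====
-- Source B: for every target square t in range(64), set bit t iff t is diagonally aligned with
-- the bishop and every square strictly between is free of blockers. Shift counts are ported
-- with .toNat, exact since every exponent reached inside Pre_ is nonnegative.
def get_bishop_attacks_alt (square : Int) (blockers : Int) : Int :=
  let rank := PySem.Int.floordiv square 8
  let file := PySem.Int.mod square 8
  (PySem.List.pyRange 0 64 1).foldl (fun attacks t =>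
    let tr := PySem.Int.floordiv t 8
    let tf := PySem.Int.mod t 8
    let n := |tr - rank|
    if n = 0 ∨ n ≠ |tf - file| then attacks
    else
      let sr : Int := if tr > rank then 1 else -1
      let sf : Int := if tf > file then 1 else -1
      if (PySem.List.pyRange 1 n 1).all
          (fun i => PySem.Int.band (blockers >>> ((rank + i * sr) * 8 + (file + i * sf)).toNat) 1 == 0)
      then PySem.Int.bor attacks ((1 : Int) <<< t.toNat)
      else attacks) 0

-- ===== PRECONDITION & SPEC =====
-- Pre_ restricts to the 64 valid chess squares (the function's natural domain): for
-- square ≤ -9 A raises ValueError (negative shift count), and for other off-board squares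
-- A ray-traces over nonexistent squares ≥ 64 (or accidental on-board ones), a meaningless
-- bitboard no caller wants; B's line-of-sight scan gives a different meaningless value there.
def Pre_get_bishop_attacks (square : Int) (blockers : Int) : Prop :=
  0 ≤ square ∧ square < 64
instance (square : Int) (blockers : Int) : Decidable (Pre_get_bishop_attacks square blockers) := by
  unfold Pre_get_bishop_attacks; infer_instance

def pvWitness_get_bishop_attacks : Int × Int := (27, 268435456)

def Spec_get_bishop_attacks (square : Int) (blockers : Int) (out : Int) : Prop := out = get_bishop_attacks_alt square blockers
instance (square : Int) (blockers : Int) (out : Int) : Decidable (Spec_get_bishop_attacks square blockers out) := by unfold Spec_get_bishop_attacks; infer_instance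

-- ===== CLAIM (what is proved, stated in full; the proofs are below) =====
def Claim_equal_get_bishop_attacks : Prop := ∀ (square : Int) (blockers : Int), Dom_get_bishop_attacks square blockers → Pre_get_bishop_attacks square blockers → Spec_get_bishop_attacks square blockers (get_bishop_attacks square blockers)

-- ===== LEMMAS AND PROOFS =====

-- Proof-side generic ray (one function for A's four loops, unified on-board guard).
def pvRay (dr df blockers : Int) : Nat → Int → Int → Int → Int
  | 0, _, _, acc => acc
  | fuel+1, r, f, acc =>
    if 0 ≤ r ∧ r < 8 ∧ 0 ≤ f ∧ f < 8 then
      let sq := r * 8 + f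
      let acc' := PySem.Int.bor acc ((1 : Int) <<< sq.toNat)
      if PySem.Int.band (blockers >>> sq.toNat) 1 ≠ 0 then acc'
      else pvRay dr df blockers fuel (r + dr) (f + df) acc'
    else acc

theorem pvRay_eq_NE (blockers : Int) : ∀ (fuel : Nat) (r f acc : Int), 0 ≤ r → 0 ≤ f →
    pvRay 1 1 blockers fuel r f acc = pvRayNE blockers fuel r f acc := by
  intro fuel
  induction fuel with
  | zero => intro r f acc _ _; rfl
  | succ n ih =>
    intro r f acc hr hf
    simp only [pvRay, pvRayNE]
    by_cases h : r < 8 ∧ f < 8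
    · rw [if_pos (by omega), if_pos h]
      split
      · rfl
      · exact ih _ _ _ (by omega) (by omega)
    · rw [if_neg (by omega), if_neg h]

theorem pvRay_eq_NW (blockers : Int) : ∀ (fuel : Nat) (r f acc : Int), 0 ≤ r → f < 8 →
    pvRay 1 (-1) blockers fuel r f acc = pvRayNW blockers fuel r f acc := by
  intro fuel
  induction fuel with
  | zero => intro r f acc _ _; rfl
  | succ n ih =>
    intro r f acc hr hf
    simp only [pvRay, pvRayNW]
    by_cases h : r < 8 ∧ f ≥ 0
    · rw [if_pos (by omega), if_pos h]
      split
      · rfl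
      · exact ih _ _ _ (by omega) (by omega)
    · rw [if_neg (by omega), if_neg h]

theorem pvRay_eq_SW (blockers : Int) : ∀ (fuel : Nat) (r f acc : Int), r < 8 → f < 8 →
    pvRay (-1) (-1) blockers fuel r f acc = pvRaySW blockers fuel r f acc := by
  intro fuel
  induction fuel with
  | zero => intro r f acc _ _; rfl
  | succ n ih =>
    intro r f acc hr hf
    simp only [pvRay, pvRaySW]
    by_cases h : r ≥ 0 ∧ f ≥ 0
    · rw [if_pos (by omega), if_pos h]
      split
      · rfl
      · exact ih _ _ _ (by omega) (by omega)
    · rw [if_neg (by omega), if_neg h]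

theorem pvRay_eq_SE (blockers : Int) : ∀ (fuel : Nat) (r f acc : Int), r < 8 → 0 ≤ f →
    pvRay (-1) 1 blockers fuel r f acc = pvRaySE blockers fuel r f acc := by
  intro fuel
  induction fuel with
  | zero => intro r f acc _ _; rfl
  | succ n ih =>
    intro r f acc hr hf
    simp only [pvRay, pvRaySE]
    by_cases h : r ≥ 0 ∧ f < 8
    · rw [if_pos (by omega), if_pos h]
      split
      · rfl
      · exact ih _ _ _ (by omega) (by omega)
    · rw [if_neg (by omega), if_neg h]

theorem pvRankFileBounds (square : Int) (h0 : 0 ≤ square) (h1 : square < 64) :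
    0 ≤ PySem.Int.floordiv square 8 ∧ PySem.Int.floordiv square 8 < 8 ∧
    0 ≤ PySem.Int.mod square 8 ∧ PySem.Int.mod square 8 < 8 := by
  rw [PySem.Int.floordiv_eq_ediv_of_pos (by omega), PySem.Int.mod_eq_emod_of_pos (by omega)]
  omega

-- bit j of a nonnegative Int
def pvBit (x : Int) (j : Nat) : Bool := x.toNat.testBit j

theorem pvBit_bor (a b : Int) (ha : 0 ≤ a) (hb : 0 ≤ b) (j : Nat) :
    pvBit (PySem.Int.bor a b) j = (pvBit a j || pvBit b j) := by
  unfold pvBit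
  rw [PySem.Int.bor_of_nonneg ha hb]
  simp

theorem pvBit_shl (sq : Int) (j : Nat) :
    pvBit ((1 : Int) <<< sq.toNat) j = decide (j = sq.toNat) := by
  unfold pvBit
  have h : ((1 : Int) <<< sq.toNat) = ((1 <<< sq.toNat : Nat) : Int) := by simp [Int.shiftLeft_eq]
  have h2 : (1 <<< sq.toNat : Nat) = 2 ^ sq.toNat := by simp [Nat.shiftLeft_eq]
  rw [h, Int.toNat_natCast, h2, Nat.testBit_two_pow]
  simp [eq_comm]

theorem pvBor_nonneg (a b : Int) (ha : 0 ≤ a) (hb : 0 ≤ b) : 0 ≤ PySem.Int.bor a b := by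
  rw [PySem.Int.bor_of_nonneg ha hb]; positivity

theorem pvShl_nonneg (k : Nat) : 0 ≤ ((1 : Int) <<< k) := by
  simp [Int.shiftLeft_eq]

theorem pvRay_nonneg (dr df blockers : Int) : ∀ (fuel : Nat) (r f acc : Int), 0 ≤ acc →
    0 ≤ pvRay dr df blockers fuel r f acc := by
  intro fuel
  induction fuel with
  | zero => intro r f acc h; exact h
  | succ n ih =>
    intro r f acc h
    simp only [pvRay]
    split
    · split
      · exact pvBor_nonneg _ _ h (pvShl_nonneg _)
      · exact ih _ _ _ (pvBor_nonneg _ _ h (pvShl_nonneg _))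
    · exact h

-- "square j is reached by the ray from (r,f) with direction (dr,df) in < fuel steps"
def pvRayHas (blockers dr df : Int) : Nat → Int → Int → Nat → Bool
  | 0, _, _, _ => false
  | fuel+1, r, f, j =>
    if 0 ≤ r ∧ r < 8 ∧ 0 ≤ f ∧ f < 8 then
      (decide (j = (r * 8 + f).toNat)) ||
        ((PySem.Int.band (blockers >>> (r * 8 + f).toNat) 1 == 0) &&
          pvRayHas blockers dr df fuel (r + dr) (f + df) j)
    else false

theorem pvBit_pvRay (dr df blockers : Int) : ∀ (fuel : Nat) (r f acc : Int) (j : Nat), 0 ≤ acc →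
    pvBit (pvRay dr df blockers fuel r f acc) j
      = (pvBit acc j || pvRayHas blockers dr df fuel r f j) := by
  intro fuel
  induction fuel with
  | zero => intro r f acc j h; simp [pvRay, pvRayHas]
  | succ n ih =>
    intro r f acc j h
    simp only [pvRay, pvRayHas]
    split
    · split
      · next hblk =>
        rw [pvBit_bor _ _ h (pvShl_nonneg _), pvBit_shl]
        have : (PySem.Int.band (blockers >>> ((r * 8 + f).toNat)) 1 == 0) = false := by
          simp only [beq_eq_false_iff_ne, ne_eq]; exact hblk
        rw [this]
        simp [Bool.or_comm]
      · next hblk =>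
        rw [ih _ _ _ _ (pvBor_nonneg _ _ h (pvShl_nonneg _)),
            pvBit_bor _ _ h (pvShl_nonneg _), pvBit_shl]
        have : (PySem.Int.band (blockers >>> ((r * 8 + f).toNat)) 1 == 0) = true := by
          simpa using hblk
        rw [this]
        cases pvBit acc j <;> cases pvRayHas blockers dr df n (r + dr) (f + df) j <;> simp
    · simp

theorem pvRayHas_iff (blockers dr df : Int) : ∀ (fuel : Nat) (r f : Int) (j : Nat),
    pvRayHas blockers dr df fuel r f j = true ↔
      ∃ k : Nat, k < fuel ∧
        (∀ i : Nat, i ≤ k → 0 ≤ r + i * dr ∧ r + i * dr < 8 ∧ 0 ≤ f + i * df ∧ f + i * df < 8) ∧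
        j = ((r + k * dr) * 8 + (f + k * df)).toNat ∧
        (∀ i : Nat, i < k → PySem.Int.band (blockers >>> ((r + i * dr) * 8 + (f + i * df)).toNat) 1 = 0) := by
  intro fuel
  induction fuel with
  | zero =>
    intro r f j
    simp only [pvRayHas]
    constructor
    · intro h; exact absurd h (by simp)
    · rintro ⟨k, hk, -⟩; omega
  | succ n ih =>
    intro r f j
    simp only [pvRayHas]
    by_cases hg : 0 ≤ r ∧ r < 8 ∧ 0 ≤ f ∧ f < 8
    · rw [if_pos hg]
      constructor
      · intro h
        rcases Bool.or_eq_true_iff.mp h with h1 | h1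
        · refine ⟨0, by omega, ?_, ?_, by omega⟩
          · intro i hi
            interval_cases i
            simpa using hg
          · simpa using of_decide_eq_true h1
        · obtain ⟨hblk, hrest⟩ := Bool.and_eq_true_iff.mp h1
          obtain ⟨k, hk, honb, hj, hclear⟩ := (ih (r + dr) (f + df) j).mp hrest
          refine ⟨k + 1, by omega, ?_, ?_, ?_⟩
          · intro i hi
            match i, hi with
            | 0, _ => simpa using hg
            | (m+1), hi =>
              have := honb m (by omega)
              push_cast at this ⊢
              constructor; · linarith [this.1]
              constructor; · linarith [this.2.1]
              constructor; · linarith [this.2.2.1]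
              · linarith [this.2.2.2]
          · rw [hj]; congr 1; push_cast; ring
          · intro i hi
            match i, hi with
            | 0, _ => simpa [beq_iff_eq] using hblk
            | (m+1), hi =>
              have := hclear m (by omega)
              have harg : r + (↑(m + 1) : Int) * dr = (r + dr) + (↑m : Int) * dr := by push_cast; ring
              have harg2 : f + (↑(m + 1) : Int) * df = (f + df) + (↑m : Int) * df := by push_cast; ring
              rw [harg, harg2]; exact this
      · rintro ⟨k, hk, honb, hj, hclear⟩
        match k, hk with
        | 0, _ =>
          apply Bool.or_eq_true_iff.mpr; left
          simp only [decide_eq_true_eq]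
          simpa using hj
        | (m+1), hk =>
          apply Bool.or_eq_true_iff.mpr; right
          apply Bool.and_eq_true_iff.mpr
          constructor
          · have := hclear 0 (by omega)
            simp only [Nat.cast_zero, zero_mul, add_zero] at this
            simp [beq_iff_eq, this]
          · apply (ih (r + dr) (f + df) j).mpr
            refine ⟨m, by omega, ?_, ?_, ?_⟩
            · intro i hi
              have := honb (i + 1) (by omega)
              push_cast at this ⊢
              constructor; · linarith [this.1]
              constructor; · linarith [this.2.1]
              constructor; · linarith [this.2.2.1]
              · linarith [this.2.2.2]
            · rw [hj]; congr 1; push_cast; ring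
            · intro i hi
              have := hclear (i + 1) (by omega)
              have harg : r + (↑(i + 1) : Int) * dr = (r + dr) + (↑i : Int) * dr := by push_cast; ring
              have harg2 : f + (↑(i + 1) : Int) * df = (f + df) + (↑i : Int) * df := by push_cast; ring
              rw [harg, harg2] at this; exact this
    · rw [if_neg hg]
      constructor
      · intro h; exact absurd h (by simp)
      · rintro ⟨k, hk, honb, -⟩
        exact absurd (by simpa using honb 0 (by omega)) hg

-- B's per-target condition (mirrors the body of the fold in get_bishop_attacks_alt)
def pvBrute (rank file blockers : Int) (t : Int) : Bool :=
  let tr := PySem.Int.floordiv t 8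
  let tf := PySem.Int.mod t 8
  let n := |tr - rank|
  if n = 0 ∨ n ≠ |tf - file| then false
  else
    let sr : Int := if tr > rank then 1 else -1
    let sf : Int := if tf > file then 1 else -1
    (PySem.List.pyRange 1 n 1).all
      (fun i => PySem.Int.band (blockers >>> ((rank + i * sr) * 8 + (file + i * sf)).toNat) 1 == 0)

theorem pvBit_fold (rank file blockers : Int) : ∀ (ts : List Int) (acc : Int) (j : Nat),
    0 ≤ acc → (∀ t ∈ ts, 0 ≤ t) →
    pvBit (ts.foldl (fun attacks t =>
      let tr := PySem.Int.floordiv t 8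
      let tf := PySem.Int.mod t 8
      let n := |tr - rank|
      if n = 0 ∨ n ≠ |tf - file| then attacks
      else
        let sr : Int := if tr > rank then 1 else -1
        let sf : Int := if tf > file then 1 else -1
        if (PySem.List.pyRange 1 n 1).all
            (fun i => PySem.Int.band (blockers >>> ((rank + i * sr) * 8 + (file + i * sf)).toNat) 1 == 0)
        then PySem.Int.bor attacks ((1 : Int) <<< t.toNat)
        else attacks) acc) j
      = (pvBit acc j || ts.any (fun t => pvBrute rank file blockers t && decide ((j : Int) = t))) := by
  have hstep : ∀ (acc t : Int),
      (let tr := PySem.Int.floordiv t 8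
       let tf := PySem.Int.mod t 8
       let n := |tr - rank|
       if n = 0 ∨ n ≠ |tf - file| then acc
       else
         let sr : Int := if tr > rank then 1 else -1
         let sf : Int := if tf > file then 1 else -1
         if (PySem.List.pyRange 1 n 1).all
             (fun i => PySem.Int.band (blockers >>> ((rank + i * sr) * 8 + (file + i * sf)).toNat) 1 == 0)
         then PySem.Int.bor acc ((1 : Int) <<< t.toNat)
         else acc)
      = (if pvBrute rank file blockers t then PySem.Int.bor acc ((1 : Int) <<< t.toNat) else acc) := by
    intro acc t
    simp only [pvBrute]
    split
    · simp
    · split <;> simp_all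
  intro ts
  induction ts with
  | nil => intro acc j _ _; simp
  | cons t ts ih =>
    intro acc j hacc hts
    simp only [List.foldl_cons, List.any_cons]
    rw [hstep]
    by_cases hb : pvBrute rank file blockers t = true
    · rw [if_pos hb, ih _ j (pvBor_nonneg _ _ hacc (pvShl_nonneg _)) (fun u hu => hts u (List.mem_cons_of_mem _ hu)),
          pvBit_bor _ _ hacc (pvShl_nonneg _), pvBit_shl, hb]
      have ht0 : 0 ≤ t := hts t List.mem_cons_self
      have : decide (j = t.toNat) = decide ((j : Int) = t) := by
        simp only [decide_eq_decide]; omega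
      rw [this]
      cases pvBit acc j <;> cases decide ((j : Int) = t) <;> simp
    · rw [if_neg hb, ih _ j hacc (fun u hu => hts u (List.mem_cons_of_mem _ hu))]
      simp [Bool.eq_false_iff.mpr hb]

theorem pvFold_nonneg (rank file blockers : Int) : ∀ (ts : List Int) (acc : Int), 0 ≤ acc →
    0 ≤ ts.foldl (fun attacks t =>
      let tr := PySem.Int.floordiv t 8
      let tf := PySem.Int.mod t 8
      let n := |tr - rank|
      if n = 0 ∨ n ≠ |tf - file| then attacks
      else
        let sr : Int := if tr > rank then 1 else -1
        let sf : Int := if tf > file then 1 else -1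
        if (PySem.List.pyRange 1 n 1).all
            (fun i => PySem.Int.band (blockers >>> ((rank + i * sr) * 8 + (file + i * sf)).toNat) 1 == 0)
        then PySem.Int.bor attacks ((1 : Int) <<< t.toNat)
        else attacks) acc := by
  intro ts
  induction ts with
  | nil => intro acc h; exact h
  | cons t ts ih =>
    intro acc h
    simp only [List.foldl_cons]
    apply ih
    dsimp only
    split_ifs <;> first | exact h | exact pvBor_nonneg _ _ h (pvShl_nonneg _)

theorem pvDivMod8 (x : Int) :
    PySem.Int.floordiv x 8 * 8 + PySem.Int.mod x 8 = x ∧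
    0 ≤ PySem.Int.mod x 8 ∧ PySem.Int.mod x 8 < 8 := by
  rw [PySem.Int.floordiv_eq_ediv_of_pos (by omega), PySem.Int.mod_eq_emod_of_pos (by omega)]
  omega

-- the bridge: a square is on some blocked-prefix-free ray iff B's line-of-sight test accepts it
theorem pvRay_to_brute (rank file blockers dr df : Int)
    (hr : 0 ≤ rank ∧ rank < 8) (hf : 0 ≤ file ∧ file < 8)
    (hdr : dr = 1 ∨ dr = -1) (hdf : df = 1 ∨ df = -1) (j : Nat)
    (h : pvRayHas blockers dr df 8 (rank + dr) (file + df) j = true) :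
    (j : Int) < 64 ∧ pvBrute rank file blockers ((j : Int)) = true := by
  obtain ⟨k, hk, honb, hj, hclear⟩ :=
    (pvRayHas_iff blockers dr df 8 (rank + dr) (file + df) j).mp h
  have hbk := honb k (le_refl k)
  set R := rank + dr + (k : Int) * dr with hRdef
  set F := file + df + (k : Int) * df with hFdef
  have hjval : (j : Int) = R * 8 + F := by
    rw [hj, Int.toNat_of_nonneg (by omega)]
  have hdm := pvDivMod8 (R * 8 + F)
  have htr : PySem.Int.floordiv (R * 8 + F) 8 = R := by omega
  have htf : PySem.Int.mod (R * 8 + F) 8 = F := by omega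
  have hRr : R - rank = ((k : Int) + 1) * dr := by rw [hRdef]; ring
  have hFf : F - file = ((k : Int) + 1) * df := by rw [hFdef]; ring
  have habsR : |R - rank| = (k : Int) + 1 := by
    rw [hRr]; rcases hdr with h | h <;> subst h <;>
      simp only [mul_one, mul_neg_one, abs_neg] <;> rw [abs_of_nonneg (by omega)]
  have habsF : |F - file| = (k : Int) + 1 := by
    rw [hFf]; rcases hdf with h | h <;> subst h <;>
      simp only [mul_one, mul_neg_one, abs_neg] <;> rw [abs_of_nonneg (by omega)]
  refine ⟨by omega, ?_⟩
  simp only [pvBrute, hjval, htr, htf, habsR, habsF]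
  rw [if_neg (by omega)]
  have hsr : (if R > rank then (1 : Int) else -1) = dr := by
    rcases hdr with h | h <;> subst h
    · exact if_pos (by omega)
    · exact if_neg (by omega)
  have hsf : (if F > file then (1 : Int) else -1) = df := by
    rcases hdf with h | h <;> subst h
    · exact if_pos (by omega)
    · exact if_neg (by omega)
  rw [hsr, hsf, List.all_eq_true]
  intro i hi
  rw [PySem.List.mem_pyRange_one] at hi
  have hm : ((i.toNat - 1 : Nat) : Int) = i - 1 := by omega
  have hc := hclear (i.toNat - 1) (by omega)
  have harg : (rank + dr + ((i.toNat - 1 : Nat) : Int) * dr) * 8 + (file + df + ((i.toNat - 1 : Nat) : Int) * df)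
      = (rank + i * dr) * 8 + (file + i * df) := by rw [hm]; ring
  rw [harg] at hc
  simp [hc]

theorem pvBrute_to_ray (rank file blockers : Int)
    (hr : 0 ≤ rank ∧ rank < 8) (hf : 0 ≤ file ∧ file < 8) (t : Int)
    (ht : 0 ≤ t) (ht64 : t < 64) (h : pvBrute rank file blockers t = true) :
    ∃ dr df : Int, (dr = 1 ∨ dr = -1) ∧ (df = 1 ∨ df = -1) ∧
      pvRayHas blockers dr df 8 (rank + dr) (file + df) t.toNat = true := by
  have hdm := pvDivMod8 t
  simp only [pvBrute] at h
  set tr := PySem.Int.floordiv t 8 with htrdef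
  set tf := PySem.Int.mod t 8 with htfdef
  split at h
  · simp at h
  next hcond =>
  push_neg at hcond
  obtain ⟨hne, habs⟩ := hcond
  simp only [Int.abs_eq_natAbs] at hne habs h
  have htrb : 0 ≤ tr ∧ tr < 8 := by omega
  set dr := (if tr > rank then (1 : Int) else -1) with hdrdef
  set df := (if tf > file then (1 : Int) else -1) with hdfdef
  have hdr1 : dr = 1 ∨ dr = -1 := by rw [hdrdef]; split_ifs <;> simp
  have hdf1 : df = 1 ∨ df = -1 := by rw [hdfdef]; split_ifs <;> simp
  have htrd : tr = rank + ((tr - rank).natAbs : Int) * dr := by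
    rw [hdrdef]; split_ifs <;> simp only [mul_one, mul_neg_one] <;> omega
  have htfd : tf = file + ((tr - rank).natAbs : Int) * df := by
    rw [hdfdef]; split_ifs <;> simp only [mul_one, mul_neg_one] <;> omega
  have hnb : 1 ≤ ((tr - rank).natAbs : Int) ∧ ((tr - rank).natAbs : Int) ≤ 7 := by omega
  refine ⟨dr, df, hdr1, hdf1, ?_⟩
  apply (pvRayHas_iff blockers dr df 8 (rank + dr) (file + df) t.toNat).mpr
  refine ⟨(tr - rank).natAbs - 1, by omega, ?_, ?_, ?_⟩
  · intro i hi
    have hii : ((i : Int)) ≤ (((tr - rank).natAbs - 1 : Nat) : Int) := by exact_mod_cast hi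
    rcases hdr1 with h1 | h1 <;> rcases hdf1 with h2 | h2 <;>
      rw [h1] at htrd <;> rw [h2] at htfd <;> rw [h1, h2] <;>
      simp only [mul_one, mul_neg_one] at htrd htfd ⊢ <;> omega
  · have e1 : rank + dr + (((tr - rank).natAbs - 1 : Nat) : Int) * dr = tr := by
      rcases hdr1 with h1 | h1 <;> rw [h1] <;> rw [h1] at htrd <;>
        simp only [mul_one, mul_neg_one] at htrd ⊢ <;> omega
    have e2 : file + df + (((tr - rank).natAbs - 1 : Nat) : Int) * df = tf := by
      rcases hdf1 with h2 | h2 <;> rw [h2] <;> rw [h2] at htfd <;>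
        simp only [mul_one, mul_neg_one] at htfd ⊢ <;> omega
    rw [e1, e2]
    omega
  · intro i hi
    rw [List.all_eq_true] at h
    have hmem : ((i : Int) + 1) ∈ PySem.List.pyRange 1 ((tr - rank).natAbs : Int) 1 := by
      rw [PySem.List.mem_pyRange_one]
      constructor
      · omega
      · have : ((i : Int)) < (((tr - rank).natAbs - 1 : Nat) : Int) := by exact_mod_cast hi
        omega
    have hc := h _ hmem
    simp only [beq_iff_eq] at hc
    rw [show (rank + dr + (i : Int) * dr) * 8 + (file + df + (i : Int) * df)
          = (rank + ((i : Int) + 1) * dr) * 8 + (file + ((i : Int) + 1) * df) from by ring]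
    exact hc

-- ===== VERDICT (by name: the statement is the Claim_ definition above) =====
theorem get_bishop_attacks_spec : Claim_equal_get_bishop_attacks := by
  intro square blockers _ hpre
  obtain ⟨h0, h1⟩ := hpre
  obtain ⟨hr0, hr1, hf0, hf1⟩ := pvRankFileBounds square h0 h1
  unfold Spec_get_bishop_attacks get_bishop_attacks get_bishop_attacks_alt
  dsimp only
  set rank := PySem.Int.floordiv square 8 with hrk
  set file := PySem.Int.mod square 8 with hfl
  rw [← pvRay_eq_NE blockers 8 _ _ _ (by omega) (by omega),
      ← pvRay_eq_NW blockers 8 _ _ _ (by omega) (by omega),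
      ← pvRay_eq_SW blockers 8 _ _ _ (by omega) (by omega),
      ← pvRay_eq_SE blockers 8 _ _ _ (by omega) (by omega)]
  have hts : ∀ t ∈ PySem.List.pyRange 0 64 1, (0 : Int) ≤ t := by
    intro t ht; rw [PySem.List.mem_pyRange_one] at ht; omega
  have n1 : (0:Int) ≤ pvRay 1 1 blockers 8 (rank + 1) (file + 1) 0 :=
    pvRay_nonneg _ _ _ _ _ _ _ (le_refl 0)
  have n2 : (0:Int) ≤ pvRay 1 (-1) blockers 8 (rank + 1) (file - 1) _ :=
    pvRay_nonneg _ _ _ _ _ _ _ n1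
  have n3 : (0:Int) ≤ pvRay (-1) (-1) blockers 8 (rank - 1) (file - 1) _ :=
    pvRay_nonneg _ _ _ _ _ _ _ n2
  have hAnn : (0:Int) ≤ pvRay (-1) 1 blockers 8 (rank - 1) (file + 1) _ :=
    pvRay_nonneg _ _ _ _ _ _ _ n3
  have hBnn := pvFold_nonneg rank file blockers (PySem.List.pyRange 0 64 1) 0 (le_refl 0)
  dsimp only at hBnn
  rw [← Int.toNat_of_nonneg hAnn, ← Int.toNat_of_nonneg hBnn]
  apply congrArg
  apply Nat.eq_of_testBit_eq
  intro j
  show pvBit _ j = pvBit _ j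
  have hfold := pvBit_fold rank file blockers (PySem.List.pyRange 0 64 1) 0 j (le_refl 0) hts
  dsimp only at hfold
  rw [pvBit_pvRay _ _ _ _ _ _ _ _ n3, pvBit_pvRay _ _ _ _ _ _ _ _ n2,
      pvBit_pvRay _ _ _ _ _ _ _ _ n1, pvBit_pvRay _ _ _ _ _ _ _ _ (le_refl 0), hfold]
  have hz : pvBit 0 j = false := by simp [pvBit]
  rw [hz]
  simp only [Bool.false_or]
  rw [Bool.eq_iff_iff]
  constructor
  · intro hor
    have hbr : (j : Int) < 64 ∧ pvBrute rank file blockers ((j : Int)) = true := by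
      rcases Bool.or_eq_true_iff.mp hor with h4 | h4
      · rcases Bool.or_eq_true_iff.mp h4 with h3 | h3
        · rcases Bool.or_eq_true_iff.mp h3 with h2 | h2
          · exact pvRay_to_brute rank file blockers 1 1 ⟨hr0, hr1⟩ ⟨hf0, hf1⟩
              (Or.inl rfl) (Or.inl rfl) j h2
          · exact pvRay_to_brute rank file blockers 1 (-1) ⟨hr0, hr1⟩ ⟨hf0, hf1⟩
              (Or.inl rfl) (Or.inr rfl) j (by
                rw [show file + (-1 : Int) = file - 1 from by ring]; exact h2)
        · exact pvRay_to_brute rank file blockers (-1) (-1) ⟨hr0, hr1⟩ ⟨hf0, hf1⟩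
            (Or.inr rfl) (Or.inr rfl) j (by
              rw [show rank + (-1 : Int) = rank - 1 from by ring,
                  show file + (-1 : Int) = file - 1 from by ring]; exact h3)
      · exact pvRay_to_brute rank file blockers (-1) 1 ⟨hr0, hr1⟩ ⟨hf0, hf1⟩
          (Or.inr rfl) (Or.inl rfl) j (by
            rw [show rank + (-1 : Int) = rank - 1 from by ring]; exact h4)
    rw [List.any_eq_true]
    refine ⟨(j : Int), ?_, ?_⟩
    · rw [PySem.List.mem_pyRange_one]; exact ⟨by omega, hbr.1⟩
    · rw [hbr.2]; simp
  · intro hany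
    rw [List.any_eq_true] at hany
    obtain ⟨t, hmem, hpred⟩ := hany
    rw [PySem.List.mem_pyRange_one] at hmem
    obtain ⟨hb, hjt⟩ := Bool.and_eq_true_iff.mp hpred
    have hjt' : (j : Int) = t := of_decide_eq_true hjt
    obtain ⟨dr, df, hdr, hdf, hray⟩ :=
      pvBrute_to_ray rank file blockers ⟨hr0, hr1⟩ ⟨hf0, hf1⟩ t (by omega) hmem.2 hb
    have hjn : t.toNat = j := by omega
    rw [hjn] at hray
    rcases hdr with h1 | h1 <;> rcases hdf with h2 | h2 <;> subst h1 <;> subst h2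
    · apply Bool.or_eq_true_iff.mpr; left
      apply Bool.or_eq_true_iff.mpr; left
      apply Bool.or_eq_true_iff.mpr; left
      exact hray
    · apply Bool.or_eq_true_iff.mpr; left
      apply Bool.or_eq_true_iff.mpr; left
      apply Bool.or_eq_true_iff.mpr; right
      rw [show file + -1 = file - 1 from by ring] at hray
      exact hray
    · apply Bool.or_eq_true_iff.mpr; right
      rw [show rank + -1 = rank - 1 from by ring] at hray
      exact hray
    · apply Bool.or_eq_true_iff.mpr; left
      apply Bool.or_eq_true_iff.mpr; right
      rw [show rank + -1 = rank - 1 from by ring, show file + -1 = file - 1 from by ring] at hray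
      exact hray
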